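-- pv_equiv track=rewrite | github.com/masahiro-999/atcoder-workspace | abc050/C/main.py | solve
-- ===== SOURCE A (Python) =====
-- from collections import deque, Counter
--
-- MOD = 1000000007
--
-- def solve(N: int, A: "List[int]"):
--     ans = 0
--     A.sort()
--     if N %2 ==1:
--         if A[0] != 0:
--             return 0
--         else:
--             A = A[1:]
--
--     c = Counter(A)
--     for i,v in c.items():
--         if v != 2:
--             return 0
--
--     return 2**(len(c)) % MOD
-- ===== SOURCE B (Python) =====
-- MOD = 1000000007
--
-- def solve(N: int, A: "List[int]"):
--     # Sorted-adjacency scan instead of Counter hashing; sorts A in place like A does.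
--     A.sort()
--     B = A
--     if N % 2 == 1:
--         if A[0] != 0:
--             return 0
--         B = A[1:]
--     if len(B) % 2 == 1:
--         return 0
--     prev = None
--     for i in range(0, len(B), 2):
--         if B[i] != B[i + 1] or B[i] == prev:
--             return 0
--         prev = B[i]
--     return pow(2, len(B) // 2, MOD)
-- ===== Notes on version B (the rewrite author's own statement) =====
-- stated objective: alternative
-- what changed: Replaces the Counter hash-grouping check (count==2 for every value) by an adjacency scan over the already-sorted array in steps of two, requiring each pair equal and distinct from the previous pair, and returns 2^(len/2) mod p via modular pow.
import Mathlib
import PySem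

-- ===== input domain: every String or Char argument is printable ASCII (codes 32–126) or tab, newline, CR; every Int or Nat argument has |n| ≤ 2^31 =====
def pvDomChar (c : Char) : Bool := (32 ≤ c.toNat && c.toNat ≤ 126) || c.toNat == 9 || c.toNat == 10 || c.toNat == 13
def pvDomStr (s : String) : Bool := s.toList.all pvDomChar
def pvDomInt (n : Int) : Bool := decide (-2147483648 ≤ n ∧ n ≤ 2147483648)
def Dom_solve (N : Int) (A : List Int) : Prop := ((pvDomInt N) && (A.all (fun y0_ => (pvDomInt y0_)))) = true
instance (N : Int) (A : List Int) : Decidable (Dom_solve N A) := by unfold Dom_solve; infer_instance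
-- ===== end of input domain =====

-- B replaces A's Counter check by an adjacency scan over the sorted list (alternative decomposition).
-- Both Pythons sort A in place; this file claims equality of the RETURN value only.

-- ===== PORT A =====
def solve (N : Int) (A : List Int) : Int :=
  let As := PySem.List.sorted A (fun x => x) false
  let A2 : Option (List Int) :=
    if PySem.Int.mod N 2 = 1 then
      if PySem.List.pyGetD As 0 0 ≠ 0 then none   -- A[0]: Pre_solve excludes the empty-list IndexError
      else some (PySem.List.slice As (some 1) none)
    else some As
  match A2 with
  | none => 0
  | some A3 =>
    let c := PySem.Dict.counter A3
    if c.items.any (fun p => p.2 ≠ 2) then 0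
    else PySem.Int.mod (2 ^ c.items.length) 1000000007

-- ===== PORT B =====
-- the range(0, len(B), 2) loop with early return: consumes two elements per step, carrying prev
def scanPairs : Option Int → List Int → Bool
  | _, [] => true
  | _, [_] => false   -- unreachable in B (length checked even before the loop)
  | prev, x :: y :: rest =>
    if x ≠ y ∨ some x = prev then false else scanPairs (some x) rest

def solve_alt (N : Int) (A : List Int) : Int :=
  let As := PySem.List.sorted A (fun x => x) false
  let B : Option (List Int) :=
    if PySem.Int.mod N 2 = 1 then
      if PySem.List.pyGetD As 0 0 ≠ 0 then none
      else some (PySem.List.slice As (some 1) none)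
    else some As
  match B with
  | none => 0
  | some B =>
    if B.length % 2 = 1 then 0
    else if scanPairs none B then PySem.Int.mod (2 ^ (B.length / 2)) 1000000007
    else 0

-- ===== PRECONDITION & SPEC =====
-- Pre_ excludes exactly the inputs where A raises IndexError on A[0]: odd N with an empty list.
def Pre_solve (N : Int) (A : List Int) : Prop := PySem.Int.mod N 2 = 1 → A ≠ []
instance (N : Int) (A : List Int) : Decidable (Pre_solve N A) := by unfold Pre_solve; infer_instance
def pvWitness_solve : Int × List Int := (4, [1, 1, 2, 2])

def Spec_solve (N : Int) (A : List Int) (out : Int) : Prop := out = solve_alt N A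
instance (N : Int) (A : List Int) (out : Int) : Decidable (Spec_solve N A out) := by unfold Spec_solve; infer_instance

-- ===== CLAIM (what is proved, stated in full; the proofs are below) =====
def Claim_equal_solve : Prop := ∀ (N : Int) (A : List Int), Dom_solve N A → Pre_solve N A → Spec_solve N A (solve N A)

-- ===== LEMMAS AND PROOFS =====

lemma scan_main (prev : Option Int) (L : List Int) (hs : L.Pairwise (· ≤ ·))
    (hp : ∀ p, prev = some p → ∀ x ∈ L, p ≤ x) :
    scanPairs prev L = true ↔
      ((∀ x ∈ L, L.count x = 2) ∧ (∀ p, prev = some p → p ∉ L)) := by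
  induction prev, L using scanPairs.induct with
  | case1 prev => simp [scanPairs]
  | case2 prev x => simp [scanPairs, List.count_cons]
  | case3 prev x y rest hcond =>
    simp only [scanPairs, if_pos hcond, Bool.false_eq_true, false_iff]
    rw [List.pairwise_cons, List.pairwise_cons] at hs
    obtain ⟨hx, hy, _⟩ := hs
    rcases hcond with hne | hprev
    · -- x ≠ y: count x = 1
      intro ⟨hc, _⟩
      have h2 := hc x (by simp)
      have hxy : x ≤ y := hx y (by simp)
      have hxr : ∀ z ∈ rest, y ≤ z := hy
      have : (x :: y :: rest).count x = 1 := by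
        simp only [List.count_cons]
        have : y ≠ x := fun h => hne h.symm
        have hnr : rest.count x = 0 := by
          rw [List.count_eq_zero]
          intro hmem
          exact hne (le_antisymm (hx y (by simp)) (le_trans (hy x hmem) (hx x (by simp [hmem]))))
        simp [this, hnr]
      omega
    · intro ⟨_, hnp⟩
      exact hnp x hprev.symm (by simp)
  | case4 prev x y rest hcond ih =>
    simp only [scanPairs, if_neg hcond]
    push_neg at hcond
    obtain ⟨hxy, hprevne⟩ := hcond
    subst hxy
    rw [List.pairwise_cons, List.pairwise_cons] at hs
    obtain ⟨hx, hy, hsr⟩ := hs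
    have hxr : ∀ z ∈ rest, x ≤ z := hy
    rw [ih hsr (by rintro p hp' z hz; cases Option.some.inj hp'; exact hxr z hz)]
    constructor
    · rintro ⟨hc, hnx⟩
      have hxnr : x ∉ rest := hnx x rfl
      constructor
      · intro z hz
        rcases List.mem_cons.mp hz with rfl | hz'
        · simp [List.count_cons, List.count_eq_zero.mpr hxnr]
        · rcases List.mem_cons.mp hz' with rfl | hzr
          · simp [List.count_cons, List.count_eq_zero.mpr hxnr]
          · have hzx : x ≠ z := fun h => hxnr (h ▸ hzr)
            simp [List.count_cons, hzx, hc z hzr]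
      · rintro p rfl hpl
        simp only [List.mem_cons] at hpl
        rcases hpl with rfl | rfl | hpr
        · exact hprevne rfl
        · exact hprevne rfl
        · have hple := hp p rfl x (by simp)
          have := hxr p hpr
          exact hprevne (by rw [le_antisymm hple this])
    · rintro ⟨hc, hnp⟩
      have hcx := hc x (by simp)
      have hxnr : x ∉ rest := by
        have h0 : rest.count x = 0 := by simp [List.count_cons] at hcx; omega
        exact List.count_eq_zero.mp h0
      constructor
      · intro z hz
        have hzx : x ≠ z := fun h => hxnr (h ▸ hz)
        have := hc z (by simp [hz])
        simpa [List.count_cons, hzx] using this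
      · rintro p hp'
        cases Option.some.inj hp'
        exact hxnr

lemma discard_not_mem (s : List Int) (x : Int) (h : x ∉ s) : PySem.Set.discard s x = s := by
  simp [PySem.Set.discard]
  exact fun a ha hax => h (hax ▸ ha)

lemma ofList_pair_cons (x : Int) (rest : List Int) (h : x ∉ rest) :
    PySem.Set.ofList (x :: x :: rest) = x :: PySem.Set.ofList rest := by
  have hm : x ∉ PySem.Set.ofList rest := by simpa [PySem.Set.mem_ofList] using h
  rw [PySem.Set.ofList_cons, PySem.Set.ofList_cons, discard_not_mem _ _ hm,
      show PySem.Set.discard (x :: PySem.Set.ofList rest) x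
         = PySem.Set.discard (PySem.Set.ofList rest) x from by simp [PySem.Set.discard],
      discard_not_mem _ _ hm]

lemma scan_len (prev : Option Int) (L : List Int) (hs : L.Pairwise (· ≤ ·))
    (hp : ∀ p, prev = some p → ∀ x ∈ L, p ≤ x)
    (h : scanPairs prev L = true) :
    L.length = 2 * (PySem.Set.ofList L).length := by
  induction prev, L using scanPairs.induct with
  | case1 prev => simp [PySem.Set.ofList_nil]
  | case2 prev x => simp [scanPairs] at h
  | case3 prev x y rest hcond => simp [scanPairs, hcond] at h
  | case4 prev x y rest hcond ih =>
    simp only [scanPairs, if_neg hcond] at h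
    push_neg at hcond
    obtain ⟨hxy, _⟩ := hcond
    subst hxy
    rw [List.pairwise_cons, List.pairwise_cons] at hs
    obtain ⟨hx1, hy1, hsr⟩ := hs
    have hp' : ∀ p, (some x : Option Int) = some p → ∀ z ∈ rest, p ≤ z := by
      rintro p hpq z hz; cases Option.some.inj hpq; exact hy1 z hz
    have hnx : x ∉ rest := ((scan_main (some x) rest hsr hp').mp h).2 x rfl
    rw [ofList_pair_cons x rest hnx]
    have hlen := ih hsr hp' h
    simp only [List.length_cons, hlen]
    omega

lemma core_eq (L : List Int) (hs : L.Pairwise (· ≤ ·)) :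
    (if (PySem.Dict.counter L).items.any (fun p => p.2 ≠ 2) then (0:Int)
     else PySem.Int.mod (2 ^ (PySem.Dict.counter L).items.length) 1000000007)
    = (if L.length % 2 = 1 then (0:Int)
       else if scanPairs none L then PySem.Int.mod (2 ^ (L.length / 2)) 1000000007 else 0) := by
  have hnone : ∀ p : Int, (none : Option Int) = some p → ∀ x ∈ L, p ≤ x := by simp
  have hiff := scan_main none L hs hnone
  have hany : ((PySem.Dict.counter L).items.any (fun p => p.2 ≠ 2) = true)
      ↔ ∃ x ∈ L, ¬ L.count x = 2 := by
    rw [PySem.Dict.items_counter]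
    simp only [List.any_map, List.any_eq_true, PySem.Set.mem_ofList, Function.comp,
      ne_eq, decide_not, Bool.not_eq_eq_eq_not, Bool.not_true, decide_eq_false_iff_not]
    constructor
    · rintro ⟨k, hk, hne⟩; exact ⟨k, hk, fun h => hne (by exact_mod_cast h)⟩
    · rintro ⟨k, hk, hne⟩; exact ⟨k, hk, fun h => hne (by exact_mod_cast h)⟩
  by_cases hall : ∀ x ∈ L, L.count x = 2
  · have hscan : scanPairs none L = true := hiff.mpr ⟨hall, by simp⟩
    have hlen := scan_len none L hs hnone hscan
    have hne : ¬ ((PySem.Dict.counter L).items.any (fun p => p.2 ≠ 2) = true) := by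
      rw [hany]; rintro ⟨k, hk, hne⟩; exact hne (hall k hk)
    rw [if_neg hne, if_neg (by omega), if_pos hscan]
    have hl : (PySem.Dict.counter L).items.length = L.length / 2 := by
      rw [PySem.Dict.items_counter, List.length_map]; omega
    rw [hl]
  · have hscan : scanPairs none L ≠ true := fun h => hall (hiff.mp h).1
    push_neg at hall
    rw [if_pos (hany.mpr (by exact_mod_cast hall))]
    by_cases hpar : L.length % 2 = 1
    · rw [if_pos hpar]
    · rw [if_neg hpar, if_neg hscan]


def aPost (o : Option (List Int)) : Int :=
  match o with
  | none => 0
  | some A3 =>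
    if (PySem.Dict.counter A3).items.any (fun p => p.2 ≠ 2) then 0
    else PySem.Int.mod (2 ^ (PySem.Dict.counter A3).items.length) 1000000007

def bPost (o : Option (List Int)) : Int :=
  match o with
  | none => 0
  | some B =>
    if B.length % 2 = 1 then 0
    else if scanPairs none B then PySem.Int.mod (2 ^ (B.length / 2)) 1000000007 else 0

lemma post_eq (o : Option (List Int)) (h : ∀ L, o = some L → L.Pairwise (· ≤ ·)) :
    aPost o = bPost o := by
  cases o with
  | none => rfl
  | some L => exact core_eq L (h L rfl)

-- ===== VERDICT (by name: the statement is the Claim_ definition above) =====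
theorem solve_spec : Claim_equal_solve := by
  intro N A _ _
  unfold Spec_solve solve solve_alt
  have hsorted : (PySem.List.sorted A (fun x => x) false).Pairwise (· ≤ ·) := by
    simpa using PySem.List.sorted_pairwise (xs := A) (key := fun x => x)
  have htail : (PySem.List.slice (PySem.List.sorted A (fun x => x) false) (some 1) none).Pairwise (· ≤ ·) := by
    rw [PySem.List.slice_from_one]
    exact hsorted.tail
  have hsort : ∀ L, (if PySem.Int.mod N 2 = 1 then
        if PySem.List.pyGetD (PySem.List.sorted A (fun x => x) false) 0 0 ≠ 0 then none
        else some (PySem.List.slice (PySem.List.sorted A (fun x => x) false) (some 1) none)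
      else some (PySem.List.sorted A (fun x => x) false)) = some L → L.Pairwise (· ≤ ·) := by
    intro L hL
    split at hL
    · split at hL
      · exact absurd hL (by simp)
      · cases Option.some.inj hL; exact htail
    · cases Option.some.inj hL; exact hsorted
  exact post_eq _ hsort
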